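-- pv_equiv track=rewrite | github.com/jmrCalvo/Python2 | first practice/1.py | cuentas
-- ===== SOURCE A (Python) =====
-- def cuentas(numero1,numero2):
--     mayor,menor=0,0
--     multiplicacion=1
--     if numero1>numero2:
--         mayor=numero1
--         menor=numero2
--     else:
--         mayor=numero2
--         menor=numero1
--     for index in range(1,menor,1):
--         if numero1%index==0 and numero2%index==0:
--             multiplicacion=multiplicacion*index
--     return multiplicacion
-- ===== SOURCE B (Python) =====
-- def cuentas(numero1, numero2):
--     # gcd-based: common divisors of numero1 and numero2 are exactly the divisors
--     # of gcd(numero1, numero2), so loop only up to the gcd instead of up to menor.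
--     menor = numero1 if numero1 < numero2 else numero2
--     if menor <= 1:
--         return 1
--     a, b = numero1, numero2
--     while b:
--         a, b = b, a % b
--     multiplicacion = 1
--     for d in range(1, a + 1):
--         if a % d == 0 and d < menor:
--             multiplicacion *= d
--     return multiplicacion
-- ===== Notes on version B (the rewrite author's own statement) =====
-- stated objective: faster
-- what changed: B first computes g = gcd(numero1, numero2) by Euclid's algorithm and multiplies the divisors of g below menor, instead of testing every integer in [1, menor) for divisibility by both inputs.
import Mathlib
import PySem

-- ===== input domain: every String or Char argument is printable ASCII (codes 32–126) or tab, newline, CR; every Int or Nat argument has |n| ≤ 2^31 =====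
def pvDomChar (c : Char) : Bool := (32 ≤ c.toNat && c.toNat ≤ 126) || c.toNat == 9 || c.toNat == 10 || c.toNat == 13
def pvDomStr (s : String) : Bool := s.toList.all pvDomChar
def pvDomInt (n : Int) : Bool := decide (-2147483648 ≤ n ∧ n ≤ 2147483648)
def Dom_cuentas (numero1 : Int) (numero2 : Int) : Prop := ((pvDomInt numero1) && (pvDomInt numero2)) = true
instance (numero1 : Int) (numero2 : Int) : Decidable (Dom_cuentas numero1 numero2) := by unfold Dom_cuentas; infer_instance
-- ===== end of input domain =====

-- B replaces A's scan of [1, menor) by Euclid's gcd followed by a scan of the divisors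
-- of the gcd below menor (objective: faster — the loop bound drops from min to gcd).

-- ===== PORT A =====
def cuentas (numero1 : Int) (numero2 : Int) : Int :=
  let menor : Int := if numero1 > numero2 then numero2 else numero1
  (PySem.List.pyRange 1 menor 1).foldl
    (fun multiplicacion index =>
      if PySem.Int.mod numero1 index = 0 ∧ PySem.Int.mod numero2 index = 0 then
        multiplicacion * index
      else multiplicacion) 1

-- ===== PORT B =====
-- Source B's hand-written Euclid loop 'while b: a, b = b, a % b'.  It is only reached with
-- both arguments ≥ 2 (menor > 1), where Python's % agrees with Nat.mod, so the Nat
-- transcription is exact there.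
def euclid (a b : Nat) : Nat :=
  if h : b = 0 then a else euclid b (a % b)
termination_by b
decreasing_by exact Nat.mod_lt _ (Nat.pos_of_ne_zero h)

def cuentas_alt (numero1 : Int) (numero2 : Int) : Int :=
  let menor : Int := if numero1 < numero2 then numero1 else numero2
  if menor ≤ 1 then 1
  else
    let g : Int := (euclid numero1.toNat numero2.toNat : Nat)
    (PySem.List.pyRange 1 (g + 1) 1).foldl
      (fun multiplicacion d =>
        if PySem.Int.mod g d = 0 ∧ d < menor then multiplicacion * d
        else multiplicacion) 1

-- ===== PRECONDITION & SPEC =====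
def Spec_cuentas (numero1 : Int) (numero2 : Int) (out : Int) : Prop := out = cuentas_alt numero1 numero2
instance (numero1 : Int) (numero2 : Int) (out : Int) : Decidable (Spec_cuentas numero1 numero2 out) := by unfold Spec_cuentas; infer_instance

-- ===== CLAIM (what is proved, stated in full; the proofs are below) =====
def Claim_equal_cuentas : Prop := ∀ (numero1 : Int) (numero2 : Int), Dom_cuentas numero1 numero2 → Spec_cuentas numero1 numero2 (cuentas numero1 numero2)

-- ===== LEMMAS AND PROOFS =====

-- the common loop shape of both ports: product of d ∈ [1, N) satisfying c
def prodIf (c : Int → Prop) [DecidablePred c] (N : Int) : Int :=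
  (PySem.List.pyRange 1 N 1).foldl (fun m d => if c d then m * d else m) 1

theorem prodIf_nil (c : Int → Prop) [DecidablePred c] {N : Int} (h : N ≤ 1) :
    prodIf c N = 1 := by
  unfold prodIf
  rw [PySem.List.pyRange_one_eq_nil h]
  rfl

theorem prodIf_succ (c : Int → Prop) [DecidablePred c] {N : Int} (h : 1 ≤ N) :
    prodIf c (N + 1) = if c N then prodIf c N * N else prodIf c N := by
  unfold prodIf
  rw [PySem.List.pyRange_one_succ_right h, List.foldl_append]
  rfl

theorem prodIf_congr_mem (c c' : Int → Prop) [DecidablePred c] [DecidablePred c'] {N : Int}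
    (h : ∀ d, 1 ≤ d → d < N → (c d ↔ c' d)) : prodIf c N = prodIf c' N := by
  unfold prodIf
  refine PySem.List.foldl_congr_mem _ _ _ _ (fun m d hd => ?_)
  rcases (PySem.List.mem_pyRange_one).1 hd with ⟨h1, h2⟩
  by_cases hc : c d
  · rw [if_pos hc, if_pos ((h d h1 h2).1 hc)]
  · rw [if_neg hc, if_neg (fun hc' => hc ((h d h1 h2).2 hc'))]

-- above M all conditions fail: extending the range does not change the product
theorem prodIf_ext (c : Int → Prop) [DecidablePred c] {M N : Int}
    (h1 : 1 ≤ M) (hMN : M ≤ N) (hc : ∀ d, M ≤ d → ¬ c d) : prodIf c N = prodIf c M := by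
  refine Int.le_induction (motive := fun N _ => prodIf c N = prodIf c M) rfl ?_ N hMN
  intro n hn ih
  rw [prodIf_succ c (le_trans h1 hn), if_neg (hc n hn), ih]

theorem euclid_eq_gcd (a b : Nat) : euclid a b = Nat.gcd a b := by
  induction b using Nat.strong_induction_on generalizing a with
  | _ b ih =>
    unfold euclid
    by_cases h : b = 0
    · simp [h]
    · rw [dif_neg h, ih (a % b) (Nat.mod_lt _ (Nat.pos_of_ne_zero h)) b,
        Nat.gcd_comm b (a % b), Nat.gcd_comm a b, Nat.gcd_rec b a]

theorem cuentas_eq_alt (numero1 numero2 : Int) :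
    cuentas numero1 numero2 = cuentas_alt numero1 numero2 := by
  set m : Int := min numero1 numero2 with hm
  have hmenorA : (if numero1 > numero2 then numero2 else numero1) = m := by
    simp only [hm]; split_ifs <;> omega
  have hmenorB : (if numero1 < numero2 then numero1 else numero2) = m := by
    simp only [hm]; split_ifs <;> omega
  have hA : cuentas numero1 numero2
      = prodIf (fun d => PySem.Int.mod numero1 d = 0 ∧ PySem.Int.mod numero2 d = 0) m := by
    simp only [cuentas, hmenorA]
    rfl
  by_cases hsmall : m ≤ 1
  · rw [hA, prodIf_nil _ hsmall]
    simp only [cuentas_alt, hmenorB]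
    rw [if_pos hsmall]
  -- now m ≥ 2, so numero1 ≥ 2 and numero2 ≥ 2
  rw [not_le] at hsmall
  have h1 : 2 ≤ numero1 := by simp only [hm] at hsmall; omega
  have h2 : 2 ≤ numero2 := by simp only [hm] at hsmall; omega
  have e1 : numero1.toNat = numero1.natAbs := by omega
  have e2 : numero2.toNat = numero2.natAbs := by omega
  set g : Int := ((Nat.gcd numero1.toNat numero2.toNat : Nat) : Int) with hg
  have hgn1 : g ∣ numero1 := by
    have h := Int.natCast_dvd_natCast.2 (Nat.gcd_dvd_left numero1.toNat numero2.toNat)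
    rwa [Int.toNat_of_nonneg (by omega)] at h
  have hgn2 : g ∣ numero2 := by
    have h := Int.natCast_dvd_natCast.2 (Nat.gcd_dvd_right numero1.toNat numero2.toNat)
    rwa [Int.toNat_of_nonneg (by omega)] at h
  have hgpos : 1 ≤ g := by
    rcases hgn1 with ⟨k, hk⟩
    by_contra hle
    have : (0:Int) ≤ g := by simp only [hg]; exact Int.natCast_nonneg _
    have hg0 : g = 0 := by omega
    rw [hg0] at hk; omega
  have hgm : g ≤ m := by
    have hl : g ≤ numero1 := Int.le_of_dvd (by omega) hgn1
    have hr : g ≤ numero2 := Int.le_of_dvd (by omega) hgn2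
    simp only [hm]; omega
  -- common divisors of numero1 and numero2 = divisors of g
  have hdvd : ∀ d : Int, (d ∣ numero1 ∧ d ∣ numero2) ↔ d ∣ g := by
    intro d
    constructor
    · rintro ⟨hd1, hd2⟩
      have hn : d.natAbs ∣ Nat.gcd numero1.toNat numero2.toNat := by
        rw [e1, e2]
        exact Nat.dvd_gcd (Int.natAbs_dvd_natAbs.2 hd1) (Int.natAbs_dvd_natAbs.2 hd2)
      exact Int.natAbs_dvd.1 (Int.natCast_dvd_natCast.2 hn)
    · intro hdg
      exact ⟨hdg.trans hgn1, hdg.trans hgn2⟩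
  -- B side, rewritten: product over [1, g+1) of the divisors of g below m
  have hB : cuentas_alt numero1 numero2
      = prodIf (fun d => d ∣ g ∧ d < m) (g + 1) := by
    simp only [cuentas_alt, hmenorB, euclid_eq_gcd]
    rw [if_neg (by omega)]
    show prodIf (fun d => PySem.Int.mod g d = 0 ∧ d < m) (g + 1) = _
    refine prodIf_congr_mem _ _ (fun d _ _ => ?_)
    rw [PySem.Int.mod_eq_zero_iff_dvd]
  -- A side: the loop condition is divisibility by g
  have hA' : cuentas numero1 numero2 = prodIf (fun d => d ∣ g) m := by
    rw [hA]
    refine prodIf_congr_mem _ _ (fun d _ _ => ?_)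
    rw [PySem.Int.mod_eq_zero_iff_dvd, PySem.Int.mod_eq_zero_iff_dvd]
    exact hdvd d
  rw [hA', hB]
  by_cases hcase : g = m
  · -- the last element g of B's range fails d < m; below g the conditions agree
    rw [prodIf_succ _ (by omega),
      if_neg (by rw [hcase]; exact fun h => absurd h.2 (lt_irrefl m)), ← hcase]
    refine prodIf_congr_mem _ _ (fun d h1d h2d => ?_)
    exact ⟨fun h => ⟨h, by omega⟩, fun h => h.1⟩
  · -- g < m: A's extra range (g, m) contributes nothing; d < m is vacuous below g+1
    have hnodvd : ∀ d : Int, g + 1 ≤ d → ¬ d ∣ g := by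
      intro d hd hdg
      have := Int.le_of_dvd (by omega) hdg
      omega
    rw [prodIf_ext _ (by omega) (by omega : g + 1 ≤ m) hnodvd]
    refine prodIf_congr_mem _ _ (fun d h1d h2d => ?_)
    exact ⟨fun h => ⟨h, by omega⟩, fun h => h.1⟩

-- ===== VERDICT (by name: the statement is the Claim_ definition above) =====
theorem cuentas_spec : Claim_equal_cuentas := by
  intro numero1 numero2 _
  exact cuentas_eq_alt numero1 numero2
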